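-- pv_equiv track=rewrite | github.com/brok3night/EVER-Framework | src/comprehension/philosophical_comprehension.py | _identify_primary_dimension
-- ===== SOURCE A (Python) =====
-- from typing import Dict, List, Any, Tuple
--
-- def _identify_primary_dimension(statement_types: List[str],
--                               insights: List[Dict]) -> str:
--     """Identify the primary philosophical dimension"""
--     # Dimensions ordered from concrete to abstract
--     dimensions = [
--         'empirical',    # Based on observation
--         'logical',      # Based on reasoning
--         'ethical',      # Based on values
--         'aesthetic',    # Based on beauty/art
--         'existential',  # Based on existence/meaning
--         'metaphysical'  # Based on fundamental reality
--     ]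
--
--     # Check statement types
--     dimension_scores = {dim: 0 for dim in dimensions}
--
--     if 'factual' in statement_types:
--         dimension_scores['empirical'] += 2
--
--     if 'analytical' in statement_types:
--         dimension_scores['logical'] += 2
--
--     if 'normative' in statement_types:
--         dimension_scores['ethical'] += 2
--
--     if 'metaphorical' in statement_types:
--         dimension_scores['aesthetic'] += 2
--
--     if 'existential' in statement_types:
--         dimension_scores['existential'] += 2
--
--     if 'conceptual' in statement_types:
--         dimension_scores['metaphysical'] += 1
--         dimension_scores['logical'] += 1
--
--     if 'paradoxical' in statement_types:
--         dimension_scores['logical'] += 1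
--         dimension_scores['metaphysical'] += 1
--
--     if 'synthetic' in statement_types:
--         dimension_scores['empirical'] += 1
--         dimension_scores['logical'] += 1
--
--     # Check insights for additional clues
--     for insight in insights:
--         desc = insight.get('description', '').lower()
--
--         if 'experience' in desc or 'observation' in desc:
--             dimension_scores['empirical'] += 1
--
--         if 'logic' in desc or 'reason' in desc:
--             dimension_scores['logical'] += 1
--
--         if 'value' in desc or 'ethical' in desc or 'moral' in desc:
--             dimension_scores['ethical'] += 1
--
--         if 'beauty' in desc or 'aesthetic' in desc or 'art' in desc:
--             dimension_scores['aesthetic'] += 1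
--
--         if 'meaning' in desc or 'purpose' in desc or 'existence' in desc:
--             dimension_scores['existential'] += 1
--
--         if 'reality' in desc or 'being' in desc or 'nature' in desc:
--             dimension_scores['metaphysical'] += 1
--
--     # Return dimension with highest score
--     return max(dimension_scores.items(), key=lambda x: x[1])[0]
-- ===== SOURCE B (Python) =====
-- from typing import Dict, List
--
-- # Table-driven, dimension-major re-implementation: each dimension's score is
-- # computed independently, then a single argmax pass picks the winner.
--
-- _DIMENSIONS = ['empirical', 'logical', 'ethical', 'aesthetic',
--                'existential', 'metaphysical']
--
-- _TYPE_WEIGHTS = {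
--     'empirical':    [('factual', 2), ('synthetic', 1)],
--     'logical':      [('analytical', 2), ('conceptual', 1),
--                      ('paradoxical', 1), ('synthetic', 1)],
--     'ethical':      [('normative', 2)],
--     'aesthetic':    [('metaphorical', 2)],
--     'existential':  [('existential', 2)],
--     'metaphysical': [('conceptual', 1), ('paradoxical', 1)],
-- }
--
-- _KEYWORDS = {
--     'empirical':    ['experience', 'observation'],
--     'logical':      ['logic', 'reason'],
--     'ethical':      ['value', 'ethical', 'moral'],
--     'aesthetic':    ['beauty', 'aesthetic', 'art'],
--     'existential':  ['meaning', 'purpose', 'existence'],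
--     'metaphysical': ['reality', 'being', 'nature'],
-- }
--
--
-- def _identify_primary_dimension(statement_types: List[str],
--                                 insights: List[Dict]) -> str:
--     descs = [insight.get('description', '').lower() for insight in insights]
--     best = None
--     best_score = 0
--     for dim in _DIMENSIONS:
--         score = sum(w for t, w in _TYPE_WEIGHTS[dim] if t in statement_types)
--         score += sum(1 for d in descs
--                      if any(k in d for k in _KEYWORDS[dim]))
--         if best is None or score > best_score:
--             best, best_score = dim, score
--     return best
-- ===== Notes on version B (the rewrite author's own statement) =====
-- stated objective: alternative
-- what changed: The flat if-chain and per-insight dict mutation are replaced by a dimension-major computation: two lookup tables (statement-type weights and description keywords per dimension), each dimension's score computed independently over the precomputed lowercased descriptions, finished by one explicit first-max argmax pass.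
import Mathlib
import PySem

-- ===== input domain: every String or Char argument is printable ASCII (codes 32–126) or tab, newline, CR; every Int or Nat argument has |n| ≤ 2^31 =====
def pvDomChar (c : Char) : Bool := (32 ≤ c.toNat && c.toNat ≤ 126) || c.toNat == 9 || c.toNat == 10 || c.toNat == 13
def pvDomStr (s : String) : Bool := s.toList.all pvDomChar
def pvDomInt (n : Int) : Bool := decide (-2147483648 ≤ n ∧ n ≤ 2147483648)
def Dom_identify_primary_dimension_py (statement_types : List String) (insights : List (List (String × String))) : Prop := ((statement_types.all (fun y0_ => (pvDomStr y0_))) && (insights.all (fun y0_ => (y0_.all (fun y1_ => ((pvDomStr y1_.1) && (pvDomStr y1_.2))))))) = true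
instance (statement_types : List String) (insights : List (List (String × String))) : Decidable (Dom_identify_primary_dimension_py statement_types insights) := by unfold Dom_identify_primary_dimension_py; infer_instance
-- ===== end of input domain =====

-- B replaces A's if-chain and per-insight dict updates by a dimension-major computation
-- from two lookup tables, finished by a single argmax pass (objective: alternative decomposition).

-- ===== PORT A =====
-- the body of A's 'for insight in insights' loop
def aInsStep (d : PySem.Dict String Int) (insight : List (String × String)) : PySem.Dict String Int :=
  let desc := PySem.Str.lower ((PySem.Dict.mk insight).getD "description" "")
  let d := if PySem.Str.isIn "experience" desc || PySem.Str.isIn "observation" desc then d.modify "empirical" 0 (· + 1) else d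
  let d := if PySem.Str.isIn "logic" desc || PySem.Str.isIn "reason" desc then d.modify "logical" 0 (· + 1) else d
  let d := if PySem.Str.isIn "value" desc || PySem.Str.isIn "ethical" desc || PySem.Str.isIn "moral" desc then d.modify "ethical" 0 (· + 1) else d
  let d := if PySem.Str.isIn "beauty" desc || PySem.Str.isIn "aesthetic" desc || PySem.Str.isIn "art" desc then d.modify "aesthetic" 0 (· + 1) else d
  let d := if PySem.Str.isIn "meaning" desc || PySem.Str.isIn "purpose" desc || PySem.Str.isIn "existence" desc then d.modify "existential" 0 (· + 1) else d
  let d := if PySem.Str.isIn "reality" desc || PySem.Str.isIn "being" desc || PySem.Str.isIn "nature" desc then d.modify "metaphysical" 0 (· + 1) else d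
  d

-- the '{dim: 0 for dim in dimensions}' init plus the eight statement-type ifs
def aTypePhase (statement_types : List String) : PySem.Dict String Int :=
  let dims := ["empirical", "logical", "ethical", "aesthetic", "existential", "metaphysical"]
  let d : PySem.Dict String Int := PySem.Dict.ofList (dims.map (fun dim => (dim, (0 : Int))))
  let d := if statement_types.contains "factual" then d.modify "empirical" 0 (· + 2) else d
  let d := if statement_types.contains "analytical" then d.modify "logical" 0 (· + 2) else d
  let d := if statement_types.contains "normative" then d.modify "ethical" 0 (· + 2) else d
  let d := if statement_types.contains "metaphorical" then d.modify "aesthetic" 0 (· + 2) else d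
  let d := if statement_types.contains "existential" then d.modify "existential" 0 (· + 2) else d
  let d := if statement_types.contains "conceptual" then (d.modify "metaphysical" 0 (· + 1)).modify "logical" 0 (· + 1) else d
  let d := if statement_types.contains "paradoxical" then (d.modify "logical" 0 (· + 1)).modify "metaphysical" 0 (· + 1) else d
  let d := if statement_types.contains "synthetic" then (d.modify "empirical" 0 (· + 1)).modify "logical" 0 (· + 1) else d
  d

def identify_primary_dimension_py (statement_types : List String) (insights : List (List (String × String))) : String :=
  let d := insights.foldl aInsStep (aTypePhase statement_types)
  match PySem.List.max? d.items (fun x => x.2) with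
  | some p => p.1
  | none => ""   -- unreachable: the dict always has six entries

-- ===== PORT B =====
def bDims : List String := ["empirical", "logical", "ethical", "aesthetic", "existential", "metaphysical"]

def bTypeWeights : PySem.Dict String (List (String × Int)) := PySem.Dict.mk
  [("empirical", [("factual", 2), ("synthetic", 1)]),
   ("logical", [("analytical", 2), ("conceptual", 1), ("paradoxical", 1), ("synthetic", 1)]),
   ("ethical", [("normative", 2)]),
   ("aesthetic", [("metaphorical", 2)]),
   ("existential", [("existential", 2)]),
   ("metaphysical", [("conceptual", 1), ("paradoxical", 1)])]

def bKeywords : PySem.Dict String (List String) := PySem.Dict.mk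
  [("empirical", ["experience", "observation"]),
   ("logical", ["logic", "reason"]),
   ("ethical", ["value", "ethical", "moral"]),
   ("aesthetic", ["beauty", "aesthetic", "art"]),
   ("existential", ["meaning", "purpose", "existence"]),
   ("metaphysical", ["reality", "being", "nature"])]

def bScore (statement_types : List String) (descs : List String) (dim : String) : Int :=
  ((bTypeWeights.getD dim []).filterMap
      (fun tw => if statement_types.contains tw.1 then some tw.2 else none)).sum
  + ((descs.countP (fun d => (bKeywords.getD dim []).any (fun k => PySem.Str.isIn k d)) : Nat) : Int)

def identify_primary_dimension_py_alt (statement_types : List String) (insights : List (List (String × String))) : String :=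
  let descs := insights.map (fun i => PySem.Str.lower ((PySem.Dict.mk i).getD "description" ""))
  let r := bDims.foldl (fun acc dim =>
    let score := bScore statement_types descs dim
    match acc with
    | none => some (dim, score)
    | some best => if best.2 < score then some (dim, score) else some best) none
  match r with
  | some best => best.1
  | none => ""   -- unreachable: bDims is nonempty

-- ===== PRECONDITION & SPEC =====
def Spec_identify_primary_dimension_py (statement_types : List String) (insights : List (List (String × String))) (out : String) : Prop := out = identify_primary_dimension_py_alt statement_types insights
instance (statement_types : List String) (insights : List (List (String × String))) (out : String) : Decidable (Spec_identify_primary_dimension_py statement_types insights out) := by unfold Spec_identify_primary_dimension_py; infer_instance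

-- ===== CLAIM (what is proved, stated in full; the proofs are below) =====
def Claim_equal_identify_primary_dimension_py : Prop := ∀ (statement_types : List String) (insights : List (List (String × String))), Dom_identify_primary_dimension_py statement_types insights → Spec_identify_primary_dimension_py statement_types insights (identify_primary_dimension_py statement_types insights)

-- ===== LEMMAS AND PROOFS =====

-- the lowercased description of one insight
def descOf (i : List (String × String)) : String := PySem.Str.lower ((PySem.Dict.mk i).getD "description" "")

def sixDict (e l t a x m : Int) : PySem.Dict String Int :=
  PySem.Dict.mk [("empirical", e), ("logical", l), ("ethical", t), ("aesthetic", a), ("existential", x), ("metaphysical", m)]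

lemma modE (e l t a x m : Int) (f : Int → Int) : (sixDict e l t a x m).modify "empirical" 0 f = sixDict (f e) l t a x m := rfl
lemma modL (e l t a x m : Int) (f : Int → Int) : (sixDict e l t a x m).modify "logical" 0 f = sixDict e (f l) t a x m := rfl
lemma modT (e l t a x m : Int) (f : Int → Int) : (sixDict e l t a x m).modify "ethical" 0 f = sixDict e l (f t) a x m := rfl
lemma modA (e l t a x m : Int) (f : Int → Int) : (sixDict e l t a x m).modify "aesthetic" 0 f = sixDict e l t (f a) x m := rfl
lemma modX (e l t a x m : Int) (f : Int → Int) : (sixDict e l t a x m).modify "existential" 0 f = sixDict e l t a (f x) m := rfl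
lemma modM (e l t a x m : Int) (f : Int → Int) : (sixDict e l t a x m).modify "metaphysical" 0 f = sixDict e l t a x (f m) := rfl

lemma ifmodE (c : Prop) [Decidable c] (e l t a x m : Int) (f : Int → Int) :
    (if c then (sixDict e l t a x m).modify "empirical" 0 f else sixDict e l t a x m) = sixDict (if c then f e else e) l t a x m := by split_ifs <;> simp [modE]
lemma ifmodL (c : Prop) [Decidable c] (e l t a x m : Int) (f : Int → Int) :
    (if c then (sixDict e l t a x m).modify "logical" 0 f else sixDict e l t a x m) = sixDict e (if c then f l else l) t a x m := by split_ifs <;> simp [modL]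
lemma ifmodT (c : Prop) [Decidable c] (e l t a x m : Int) (f : Int → Int) :
    (if c then (sixDict e l t a x m).modify "ethical" 0 f else sixDict e l t a x m) = sixDict e l (if c then f t else t) a x m := by split_ifs <;> simp [modT]
lemma ifmodA (c : Prop) [Decidable c] (e l t a x m : Int) (f : Int → Int) :
    (if c then (sixDict e l t a x m).modify "aesthetic" 0 f else sixDict e l t a x m) = sixDict e l t (if c then f a else a) x m := by split_ifs <;> simp [modA]
lemma ifmodX (c : Prop) [Decidable c] (e l t a x m : Int) (f : Int → Int) :
    (if c then (sixDict e l t a x m).modify "existential" 0 f else sixDict e l t a x m) = sixDict e l t a (if c then f x else x) m := by split_ifs <;> simp [modX]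
lemma ifmodML (c : Prop) [Decidable c] (e l t a x m : Int) (f g : Int → Int) :
    (if c then ((sixDict e l t a x m).modify "metaphysical" 0 f).modify "logical" 0 g else sixDict e l t a x m) = sixDict e (if c then g l else l) t a x (if c then f m else m) := by split_ifs <;> simp [modM, modL]
lemma ifmodLM (c : Prop) [Decidable c] (e l t a x m : Int) (f g : Int → Int) :
    (if c then ((sixDict e l t a x m).modify "logical" 0 f).modify "metaphysical" 0 g else sixDict e l t a x m) = sixDict e (if c then f l else l) t a x (if c then g m else m) := by split_ifs <;> simp [modM, modL]
lemma ifmodEL (c : Prop) [Decidable c] (e l t a x m : Int) (f g : Int → Int) :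
    (if c then ((sixDict e l t a x m).modify "empirical" 0 f).modify "logical" 0 g else sixDict e l t a x m) = sixDict (if c then f e else e) (if c then g l else l) t a x m := by split_ifs <;> simp [modE, modL]

lemma aInsStep_six (e l t a x m : Int) (i : List (String × String)) :
    aInsStep (sixDict e l t a x m) i =
    sixDict (e + if PySem.Str.isIn "experience" (descOf i) || PySem.Str.isIn "observation" (descOf i) then 1 else 0)
            (l + if PySem.Str.isIn "logic" (descOf i) || PySem.Str.isIn "reason" (descOf i) then 1 else 0)
            (t + if PySem.Str.isIn "value" (descOf i) || PySem.Str.isIn "ethical" (descOf i) || PySem.Str.isIn "moral" (descOf i) then 1 else 0)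
            (a + if PySem.Str.isIn "beauty" (descOf i) || PySem.Str.isIn "aesthetic" (descOf i) || PySem.Str.isIn "art" (descOf i) then 1 else 0)
            (x + if PySem.Str.isIn "meaning" (descOf i) || PySem.Str.isIn "purpose" (descOf i) || PySem.Str.isIn "existence" (descOf i) then 1 else 0)
            (m + if PySem.Str.isIn "reality" (descOf i) || PySem.Str.isIn "being" (descOf i) || PySem.Str.isIn "nature" (descOf i) then 1 else 0) := by
  simp only [aInsStep, descOf]
  split_ifs <;> simp only [modE, modL, modT, modA, modX, modM, add_zero]

lemma fold_insights (ins : List (List (String × String))) :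
    ∀ e l t a x m : Int,
    ins.foldl aInsStep (sixDict e l t a x m) =
    sixDict (e + (ins.countP (fun i => PySem.Str.isIn "experience" (descOf i) || PySem.Str.isIn "observation" (descOf i)) : Nat))
            (l + (ins.countP (fun i => PySem.Str.isIn "logic" (descOf i) || PySem.Str.isIn "reason" (descOf i)) : Nat))
            (t + (ins.countP (fun i => PySem.Str.isIn "value" (descOf i) || PySem.Str.isIn "ethical" (descOf i) || PySem.Str.isIn "moral" (descOf i)) : Nat))
            (a + (ins.countP (fun i => PySem.Str.isIn "beauty" (descOf i) || PySem.Str.isIn "aesthetic" (descOf i) || PySem.Str.isIn "art" (descOf i)) : Nat))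
            (x + (ins.countP (fun i => PySem.Str.isIn "meaning" (descOf i) || PySem.Str.isIn "purpose" (descOf i) || PySem.Str.isIn "existence" (descOf i)) : Nat))
            (m + (ins.countP (fun i => PySem.Str.isIn "reality" (descOf i) || PySem.Str.isIn "being" (descOf i) || PySem.Str.isIn "nature" (descOf i)) : Nat)) := by
  induction ins with
  | nil => intro e l t a x m; simp
  | cons i rest ih =>
      intro e l t a x m
      rw [List.foldl_cons, aInsStep_six, ih]
      simp only [sixDict, List.countP_cons, PySem.Dict.mk.injEq, List.cons.injEq, Prod.mk.injEq,
        and_true, true_and]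
      refine ⟨?_, ?_, ?_, ?_, ?_, ?_⟩ <;> push_cast <;> split_ifs <;> omega

lemma typePhase_eq (st : List String) :
    aTypePhase st =
    sixDict ((if st.contains "factual" then 2 else 0) + (if st.contains "synthetic" then 1 else 0))
            ((if st.contains "analytical" then 2 else 0) + (if st.contains "conceptual" then 1 else 0)
              + (if st.contains "paradoxical" then 1 else 0) + (if st.contains "synthetic" then 1 else 0))
            (if st.contains "normative" then 2 else 0)
            (if st.contains "metaphorical" then 2 else 0)
            (if st.contains "existential" then 2 else 0)
            ((if st.contains "conceptual" then 1 else 0) + (if st.contains "paradoxical" then 1 else 0)) := by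
  have base : PySem.Dict.ofList ((["empirical", "logical", "ethical", "aesthetic", "existential", "metaphysical"]).map (fun dim => (dim, (0 : Int)))) = sixDict 0 0 0 0 0 0 := rfl
  simp only [aTypePhase, base, ifmodE, ifmodL, ifmodT, ifmodA, ifmodX, ifmodML, ifmodLM, ifmodEL]
  simp only [sixDict, PySem.Dict.mk.injEq, List.cons.injEq, Prod.mk.injEq, and_true, true_and]
  refine ⟨?_, ?_, ?_, ?_, ?_, ?_⟩ <;> split_ifs <;> omega

lemma bScoreE (st : List String) (descs : List String) :
    bScore st descs "empirical" =
    ((if st.contains "factual" then 2 else 0) + (if st.contains "synthetic" then 1 else 0))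
      + ((descs.countP (fun d => PySem.Str.isIn "experience" d || PySem.Str.isIn "observation" d) : Nat) : Int) := by
  simp only [bScore]
  congr 2
  · by_cases h1 : "factual" ∈ st <;> by_cases h2 : "synthetic" ∈ st <;>
      simp [bTypeWeights, PySem.Dict.getD, PySem.Dict.get?, List.filterMap, List.contains_eq_mem, h1, h2]
  · apply List.countP_congr; intro d _
    simp [bKeywords, PySem.Dict.getD, PySem.Dict.get?]

lemma bScoreL (st : List String) (descs : List String) :
    bScore st descs "logical" =
    ((if st.contains "analytical" then 2 else 0) + (if st.contains "conceptual" then 1 else 0)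
      + (if st.contains "paradoxical" then 1 else 0) + (if st.contains "synthetic" then 1 else 0))
      + ((descs.countP (fun d => PySem.Str.isIn "logic" d || PySem.Str.isIn "reason" d) : Nat) : Int) := by
  simp only [bScore]
  congr 2
  · by_cases h1 : "analytical" ∈ st <;> by_cases h2 : "conceptual" ∈ st <;>
    by_cases h3 : "paradoxical" ∈ st <;> by_cases h4 : "synthetic" ∈ st <;>
      simp [bTypeWeights, PySem.Dict.getD, PySem.Dict.get?, List.filterMap, List.contains_eq_mem, h1, h2, h3, h4]
  · apply List.countP_congr; intro d _
    simp [bKeywords, PySem.Dict.getD, PySem.Dict.get?]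

lemma bScoreT (st : List String) (descs : List String) :
    bScore st descs "ethical" =
    (if st.contains "normative" then 2 else 0)
      + ((descs.countP (fun d => PySem.Str.isIn "value" d || PySem.Str.isIn "ethical" d || PySem.Str.isIn "moral" d) : Nat) : Int) := by
  simp only [bScore]
  congr 2
  · by_cases h1 : "normative" ∈ st <;>
      simp [bTypeWeights, PySem.Dict.getD, PySem.Dict.get?, List.filterMap, List.contains_eq_mem, h1]
  · apply List.countP_congr; intro d _
    simp [bKeywords, PySem.Dict.getD, PySem.Dict.get?, Bool.or_assoc]

lemma bScoreA (st : List String) (descs : List String) :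
    bScore st descs "aesthetic" =
    (if st.contains "metaphorical" then 2 else 0)
      + ((descs.countP (fun d => PySem.Str.isIn "beauty" d || PySem.Str.isIn "aesthetic" d || PySem.Str.isIn "art" d) : Nat) : Int) := by
  simp only [bScore]
  congr 2
  · by_cases h1 : "metaphorical" ∈ st <;>
      simp [bTypeWeights, PySem.Dict.getD, PySem.Dict.get?, List.filterMap, List.contains_eq_mem, h1]
  · apply List.countP_congr; intro d _
    simp [bKeywords, PySem.Dict.getD, PySem.Dict.get?, Bool.or_assoc]

lemma bScoreX (st : List String) (descs : List String) :
    bScore st descs "existential" =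
    (if st.contains "existential" then 2 else 0)
      + ((descs.countP (fun d => PySem.Str.isIn "meaning" d || PySem.Str.isIn "purpose" d || PySem.Str.isIn "existence" d) : Nat) : Int) := by
  simp only [bScore]
  congr 2
  · by_cases h1 : "existential" ∈ st <;>
      simp [bTypeWeights, PySem.Dict.getD, PySem.Dict.get?, List.filterMap, List.contains_eq_mem, h1]
  · apply List.countP_congr; intro d _
    simp [bKeywords, PySem.Dict.getD, PySem.Dict.get?, Bool.or_assoc]

lemma bScoreM (st : List String) (descs : List String) :
    bScore st descs "metaphysical" =
    ((if st.contains "conceptual" then 1 else 0) + (if st.contains "paradoxical" then 1 else 0))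
      + ((descs.countP (fun d => PySem.Str.isIn "reality" d || PySem.Str.isIn "being" d || PySem.Str.isIn "nature" d) : Nat) : Int) := by
  simp only [bScore]
  congr 2
  · by_cases h1 : "conceptual" ∈ st <;> by_cases h2 : "paradoxical" ∈ st <;>
      simp [bTypeWeights, PySem.Dict.getD, PySem.Dict.get?, List.filterMap, List.contains_eq_mem, h1, h2]
  · apply List.countP_congr; intro d _
    simp [bKeywords, PySem.Dict.getD, PySem.Dict.get?, Bool.or_assoc]

lemma max?_as_step (l : List (String × Int)) :
    PySem.List.max? l (fun x => x.2) =
    List.foldl (fun acc x =>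
      match acc with
      | none => some x
      | some m => if m.2 < x.2 then some x else some m) none l := by
  unfold PySem.List.max?
  apply List.foldl_ext
  intro acc x _
  cases acc <;> rfl

lemma step_fold_eq (sc : String → Int) (l : List (String × Int)) (o : Option (String × Int))
    (h : ∀ p ∈ l, sc p.1 = p.2) :
    List.foldl (fun acc x =>
      match acc with
      | none => some x
      | some m => if m.2 < x.2 then some x else some m) o l =
    List.foldl (fun acc dim =>
      let score := sc dim
      match acc with
      | none => some (dim, score)
      | some best => if best.2 < score then some (dim, score) else some best) o (l.map Prod.fst) := by
  induction l generalizing o with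
  | nil => rfl
  | cons x xs ih =>
      have hx : sc x.1 = x.2 := h x (List.mem_cons_self)
      rw [List.map_cons, List.foldl_cons, List.foldl_cons, ih _ (fun p hp => h p (List.mem_cons_of_mem _ hp))]
      cases o <;> simp [hx]

lemma argmax_eq (st : List String) (descs : List String) (v1 v2 v3 v4 v5 v6 : Int)
    (h1 : bScore st descs "empirical" = v1) (h2 : bScore st descs "logical" = v2)
    (h3 : bScore st descs "ethical" = v3) (h4 : bScore st descs "aesthetic" = v4)
    (h5 : bScore st descs "existential" = v5) (h6 : bScore st descs "metaphysical" = v6) :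
    (match PySem.List.max? (sixDict v1 v2 v3 v4 v5 v6).items (fun x => x.2) with
     | some p => p.1 | none => "") =
    (match bDims.foldl (fun acc dim =>
        let score := bScore st descs dim
        match acc with
        | none => some (dim, score)
        | some best => if best.2 < score then some (dim, score) else some best) none with
     | some best => best.1 | none => "") := by
  have hmem : ∀ p ∈ [("empirical", v1), ("logical", v2), ("ethical", v3), ("aesthetic", v4),
      ("existential", v5), ("metaphysical", v6)], bScore st descs p.1 = p.2 := by
    intro p hp; fin_cases hp <;> simp [h1, h2, h3, h4, h5, h6]
  have key := (max?_as_step _).trans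
    (step_fold_eq (bScore st descs) [("empirical", v1), ("logical", v2), ("ethical", v3),
      ("aesthetic", v4), ("existential", v5), ("metaphysical", v6)] none hmem)
  simp only [List.map_cons, List.map_nil] at key
  show (match PySem.List.max? [("empirical", v1), ("logical", v2), ("ethical", v3), ("aesthetic", v4),
      ("existential", v5), ("metaphysical", v6)] (fun x => x.2) with
    | some p => p.1 | none => "") = _
  rw [key]
  simp only [bDims]

-- ===== VERDICT (by name: the statement is the Claim_ definition above) =====
theorem identify_primary_dimension_py_spec : Claim_equal_identify_primary_dimension_py := by
  intro st ins _
  unfold Spec_identify_primary_dimension_py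
  show (identify_primary_dimension_py st ins) = _
  unfold identify_primary_dimension_py identify_primary_dimension_py_alt
  rw [typePhase_eq, fold_insights]
  exact argmax_eq st (ins.map (fun i => PySem.Str.lower ((PySem.Dict.mk i).getD "description" "")))
    _ _ _ _ _ _
    (by rw [bScoreE]; simp [List.countP_map, descOf, Function.comp_def])
    (by rw [bScoreL]; simp [List.countP_map, descOf, Function.comp_def])
    (by rw [bScoreT]; simp [List.countP_map, descOf, Function.comp_def])
    (by rw [bScoreA]; simp [List.countP_map, descOf, Function.comp_def])
    (by rw [bScoreX]; simp [List.countP_map, descOf, Function.comp_def])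
    (by rw [bScoreM]; simp [List.countP_map, descOf, Function.comp_def])
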